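-- pv_equiv track=rewrite | github.com/cmscleberson/dnaalignmenttrie | 01geradados.py | geraConserv
-- ===== SOURCE A (Python) =====
-- def geraConserv(listaCon, listaSeq):
--     listTemp = []
--     listaAdd = []
--
--
--     for item in listaCon:
--         min = item[0]
--         tam = len(item) -1
--         max = item[tam]
--         for p in range(len(listaSeq)):
--             listTemp.append(listaSeq[p][min:max+1])
--
--         listaAdd.append(listTemp.copy())
--         listTemp.clear()
--
--
--     #converte cada linha em uma palavra pra ser usada na Trie
--     lTemp = []
--     listaStr = []
--     separator = ''
--     for item in listaAdd:
--         for j in item: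
--             strAm = separator.join(j)
--             lTemp.append(strAm)
--         listaStr.append(lTemp.copy())
--         lTemp.clear()
--
--     return listaStr
-- ===== SOURCE B (Python) =====
-- def geraConserv(listaCon, listaSeq):
--     listaStr = []
--     for item in listaCon:
--         min_ = item[0]
--         max_ = item[-1]
--         listaStr.append([''.join(seq[min_:max_ + 1]) for seq in listaSeq])
--     return listaStr
-- ===== Notes on version B (the rewrite author's own statement) =====
-- stated objective: simpler
-- what changed: Fuses A's two phases (building per-region slice lists, then a separate join pass) into one loop that emits each joined row directly, removing the listTemp/listaAdd/lTemp scratch lists.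
import Mathlib
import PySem

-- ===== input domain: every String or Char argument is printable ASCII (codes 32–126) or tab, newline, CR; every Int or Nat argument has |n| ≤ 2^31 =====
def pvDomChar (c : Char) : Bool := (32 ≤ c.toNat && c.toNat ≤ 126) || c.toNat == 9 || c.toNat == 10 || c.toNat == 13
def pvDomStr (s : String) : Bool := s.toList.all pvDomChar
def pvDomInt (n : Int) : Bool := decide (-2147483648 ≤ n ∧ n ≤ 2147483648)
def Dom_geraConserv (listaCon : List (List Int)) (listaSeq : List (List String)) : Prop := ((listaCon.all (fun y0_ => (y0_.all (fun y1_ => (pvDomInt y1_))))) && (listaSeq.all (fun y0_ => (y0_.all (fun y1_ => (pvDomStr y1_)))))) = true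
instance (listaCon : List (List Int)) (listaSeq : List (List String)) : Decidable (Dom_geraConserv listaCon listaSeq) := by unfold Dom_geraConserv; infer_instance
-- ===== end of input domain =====

-- B fuses A's two passes (slice-collection, then join) into one loop that emits each
-- joined row directly, with no intermediate scratch lists. Objective: simpler.

-- ===== PORT A =====
-- literal transliteration of A: phase 1 builds listaAdd (lists of slices), phase 2 joins.
def geraConserv (listaCon : List (List Int)) (listaSeq : List (List String)) : List (List String) :=
  let listaAdd : List (List (List String)) :=
    listaCon.foldl (fun acc item =>
      let mn := (PySem.List.pyGet? item 0).getD 0          -- item[0]; none (IndexError) excluded by Pre_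
      let tam : Int := (item.length : Int) - 1
      let mx := (PySem.List.pyGet? item tam).getD 0        -- item[tam]
      let listTemp :=
        (PySem.List.pyRange 0 (listaSeq.length : Int) 1).foldl
          (fun t p => t ++ [PySem.List.slice (PySem.List.pyGetD listaSeq p []) (some mn) (some (mx + 1))]) []
      acc ++ [listTemp]) []
  listaAdd.foldl (fun acc item =>
    let lTemp := item.foldl (fun t j => t ++ [PySem.Str.join "" j]) []
    acc ++ [lTemp]) []

-- ===== PORT B =====
-- literal transliteration of B: one loop, appending the comprehension's row directly.
def geraConserv_alt (listaCon : List (List Int)) (listaSeq : List (List String)) : List (List String) :=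
  listaCon.foldl (fun acc item =>
    let mn := (PySem.List.pyGet? item 0).getD 0            -- item[0]
    let mx := (PySem.List.pyGet? item (-1)).getD 0         -- item[-1]
    acc ++ [listaSeq.map (fun seq => PySem.Str.join "" (PySem.List.slice seq (some mn) (some (mx + 1))))]) []

-- ===== PRECONDITION & SPEC =====
-- Pre_ excludes inputs with an empty region list, on which Python's item[0] raises IndexError.
def Pre_geraConserv (listaCon : List (List Int)) (listaSeq : List (List String)) : Prop :=
  ∀ item ∈ listaCon, item ≠ []
instance (listaCon : List (List Int)) (listaSeq : List (List String)) : Decidable (Pre_geraConserv listaCon listaSeq) := by unfold Pre_geraConserv; infer_instance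
def pvWitness_geraConserv : List (List Int) × List (List String) :=
  ([[0, 1], [2, 2]], [["a", "b", "c"], ["g", "t", "c"]])

def Spec_geraConserv (listaCon : List (List Int)) (listaSeq : List (List String)) (out : List (List String)) : Prop := out = geraConserv_alt listaCon listaSeq
instance (listaCon : List (List Int)) (listaSeq : List (List String)) (out : List (List String)) : Decidable (Spec_geraConserv listaCon listaSeq out) := by unfold Spec_geraConserv; infer_instance

-- ===== CLAIM (what is proved, stated in full; the proofs are below) =====
def Claim_equal_geraConserv : Prop := ∀ (listaCon : List (List Int)) (listaSeq : List (List String)), Dom_geraConserv listaCon listaSeq → Pre_geraConserv listaCon listaSeq → Spec_geraConserv listaCon listaSeq (geraConserv listaCon listaSeq)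

-- ===== LEMMAS AND PROOFS =====

-- the row A produces for one region, in map form
def rowA (listaSeq : List (List String)) (item : List Int) : List (List String) :=
  let mn := (PySem.List.pyGet? item 0).getD 0
  let mx := (PySem.List.pyGet? item ((item.length : Int) - 1)).getD 0
  listaSeq.map (fun seq => PySem.List.slice seq (some mn) (some (mx + 1)))

-- A's phase-1 inner loop equals rowA
theorem phase1_inner (listaSeq : List (List String)) (item : List Int) :
    (PySem.List.pyRange 0 (listaSeq.length : Int) 1).foldl
      (fun t p => t ++ [PySem.List.slice (PySem.List.pyGetD listaSeq p [])
        (some ((PySem.List.pyGet? item 0).getD 0))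
        (some ((PySem.List.pyGet? item ((item.length : Int) - 1)).getD 0 + 1))]) []
      = rowA listaSeq item := by
  rw [PySem.List.foldl_append_singleton_eq_map]
  have h := PySem.List.map_pyGetD_pyRange_zero' listaSeq ([] : List String)
  calc (PySem.List.pyRange 0 (listaSeq.length : Int) 1).map
          (fun p => PySem.List.slice (PySem.List.pyGetD listaSeq p [])
            (some ((PySem.List.pyGet? item 0).getD 0))
            (some ((PySem.List.pyGet? item ((item.length : Int) - 1)).getD 0 + 1)))
      = ((PySem.List.pyRange 0 (listaSeq.length : Int) 1).map
          (fun p => PySem.List.pyGetD listaSeq p [])).map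
          (fun seq => PySem.List.slice seq
            (some ((PySem.List.pyGet? item 0).getD 0))
            (some ((PySem.List.pyGet? item ((item.length : Int) - 1)).getD 0 + 1))) := by
        rw [List.map_map]; rfl
    _ = rowA listaSeq item := by rw [h]; rfl

-- each foldl-append phase is a map
theorem phase_map {α β : Type} (f : α → β) (l : List α) :
    l.foldl (fun acc x => acc ++ [f x]) [] = l.map f :=
  PySem.List.foldl_append_singleton_eq_map f l []

-- A in closed map form
theorem geraConserv_eq_map (listaCon : List (List Int)) (listaSeq : List (List String)) :
    geraConserv listaCon listaSeq
      = listaCon.map (fun item => (rowA listaSeq item).map (PySem.Str.join "")) := by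
  unfold geraConserv
  rw [phase_map, phase_map]
  rw [List.map_map]
  refine List.map_congr_left (fun item _ => ?_)
  simp only [Function.comp]
  rw [phase1_inner, phase_map]

-- last-element access: item[len(item)-1] = item[-1] for nonempty item
theorem pyGet?_len_sub_one (item : List Int) (h : item ≠ []) :
    PySem.List.pyGet? item ((item.length : Int) - 1) = PySem.List.pyGet? item (-1) := by
  rw [PySem.List.pyGet?_neg_one]
  have hlen : 0 < item.length := List.length_pos_iff.mpr h
  have : ((item.length : Int) - 1) = ((item.length - 1 : Nat) : Int) := by omega
  rw [this, PySem.List.pyGet?_natCast]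
  rw [List.getLast?_eq_getElem?]

-- ===== VERDICT (by name: the statement is the Claim_ definition above) =====
theorem geraConserv_spec : Claim_equal_geraConserv := by
  intro listaCon listaSeq _ hpre
  unfold Spec_geraConserv geraConserv_alt
  rw [geraConserv_eq_map, phase_map]
  refine List.map_congr_left (fun item hmem => ?_)
  rw [rowA, pyGet?_len_sub_one item (hpre item hmem)]
  simp [List.map_map, Function.comp]
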